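-- pv_equiv track=rewrite | github.com/surbhi-guptav/Cryptography-Algorithms | Algorithms and Theorems/Mnagler.py | mangler
-- ===== SOURCE A (Python) =====
-- def mangler(input_bits):
--     # Ensure input_bits is 32 bits long
--     input_bits = input_bits.zfill(32)
--
--     # Divide input into 8 4-bit chunks
--     chunks = [input_bits[i:i+4] for i in range(0, 32, 4)]
--
--     # Initialize the output bits
--     output_bits = ""
--
--     # Process the chunks and concatenate left and right bits
--     for i in range(8):
--         # For the first 4-bit chunk, concatenate a 0 to the left
--         left_bit = '0' if i == 0 else chunks[i-1][0]
--         # For the last 4-bit chunk, concatenate a 0 to the right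
--         right_bit = '0' if i == 7 else chunks[i+1][1]
--
--         # Concatenate left and right bits from adjacent chunks
--         output_bits += left_bit + chunks[i] + right_bit
--
--     # Output 48 bits
--     return output_bits
-- ===== SOURCE B (Python) =====
-- # Table-driven rewrite: one flat pass over a hardcoded 48-entry expansion table
-- # (source bit index per output position; -1 = literal '0').
--
-- _E = [-1, 0, 1, 2, 3, 5,
--       0, 4, 5, 6, 7, 9,
--       4, 8, 9, 10, 11, 13,
--       8, 12, 13, 14, 15, 17,
--       12, 16, 17, 18, 19, 21,
--       16, 20, 21, 22, 23, 25,
--       20, 24, 25, 26, 27, 29,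
--       24, 28, 29, 30, 31, -1]
--
-- def mangler(input_bits):
--     s = input_bits.zfill(32)
--     return ''.join('0' if j < 0 else s[j] for j in _E)
-- ===== Notes on version B (the rewrite author's own statement) =====
-- stated objective: idiomatic
-- what changed: Replaces A's chunk-splitting loop (8 slices plus adjacent-chunk left/right bit logic) with a single flat pass over a hardcoded 48-entry expansion/index table where -1 marks the two constant zero-bit positions.
import Mathlib
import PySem

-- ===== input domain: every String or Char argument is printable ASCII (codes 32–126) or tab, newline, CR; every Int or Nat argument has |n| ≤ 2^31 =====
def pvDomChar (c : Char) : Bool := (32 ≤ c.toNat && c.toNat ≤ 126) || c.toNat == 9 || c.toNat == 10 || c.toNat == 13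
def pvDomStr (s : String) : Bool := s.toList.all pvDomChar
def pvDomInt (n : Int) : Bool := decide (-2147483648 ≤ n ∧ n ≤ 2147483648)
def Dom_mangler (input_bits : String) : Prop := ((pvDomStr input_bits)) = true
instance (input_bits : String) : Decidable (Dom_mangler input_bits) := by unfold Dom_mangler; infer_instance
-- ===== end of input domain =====

-- B replaces A's chunk-splitting loop by one flat pass over a hardcoded 48-entry index table (objective: idiomatic).

-- ===== PORT A =====
-- literal port of A: zfill to 32, split into 8 slices of 4, loop i = 0..7 appending
-- left bit, chunk, right bit (in-range list/string indexing ported with pyGetD).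
def mangler (input_bits : String) : String :=
  let cs := PySem.Chars.zfill input_bits.toList 32
  let chunks := (PySem.List.pyRange 0 32 4).map
    (fun i => PySem.List.slice cs (some i) (some (i + 4)))
  let out := (PySem.List.pyRange 0 8 1).foldl
    (fun acc i =>
      let left : List Char :=
        if i = 0 then ['0']
        else [PySem.List.pyGetD (PySem.List.pyGetD chunks (i - 1) []) 0 '0']
      let right : List Char :=
        if i = 7 then ['0']
        else [PySem.List.pyGetD (PySem.List.pyGetD chunks (i + 1) []) 1 '0']
      acc ++ left ++ PySem.List.pyGetD chunks i [] ++ right)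
    []
  String.ofList out

-- ===== PORT B =====
-- hardcoded expansion table: source bit index per output position, -1 = constant zero bit
def manglerTable : List Int :=
  [-1, 0, 1, 2, 3, 5,
   0, 4, 5, 6, 7, 9,
   4, 8, 9, 10, 11, 13,
   8, 12, 13, 14, 15, 17,
   12, 16, 17, 18, 19, 21,
   16, 20, 21, 22, 23, 25,
   20, 24, 25, 26, 27, 29,
   24, 28, 29, 30, 31, -1]

def mangler_alt (input_bits : String) : String :=
  let cs := PySem.Chars.zfill input_bits.toList 32
  String.ofList (manglerTable.map
    (fun j => if j < 0 then '0' else PySem.List.pyGetD cs j '0'))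

-- ===== PRECONDITION & SPEC =====
def Spec_mangler (input_bits : String) (out : String) : Prop := out = mangler_alt input_bits
instance (input_bits : String) (out : String) : Decidable (Spec_mangler input_bits out) := by unfold Spec_mangler; infer_instance

-- ===== CLAIM (what is proved, stated in full; the proofs are below) =====
def Claim_equal_mangler : Prop := ∀ (input_bits : String), Dom_mangler input_bits → Spec_mangler input_bits (mangler input_bits)

-- ===== LEMMAS AND PROOFS =====

lemma slice_four (cs : List Char) (a : Int) (ha : 0 ≤ a) (h : a.toNat + 4 ≤ cs.length) :
    PySem.List.slice cs (some a) (some (a + 4)) =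
      [PySem.List.pyGetD cs a '0', PySem.List.pyGetD cs (a + 1) '0',
       PySem.List.pyGetD cs (a + 2) '0', PySem.List.pyGetD cs (a + 3) '0'] := by
  rw [PySem.List.slice_toNat cs ha (by omega)]
  have h4 : (a + 4).toNat - a.toNat = 4 := by omega
  rw [h4]
  rw [PySem.List.pyGetD_eq_getElem cs (i := a) '0' ha (by omega),
      PySem.List.pyGetD_eq_getElem cs (i := a+1) '0' (by omega) (by omega),
      PySem.List.pyGetD_eq_getElem cs (i := a+2) '0' (by omega) (by omega),
      PySem.List.pyGetD_eq_getElem cs (i := a+3) '0' (by omega) (by omega)]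
  have h1 : (a+1).toNat = a.toNat + 1 := by omega
  have h2 : (a+2).toNat = a.toNat + 2 := by omega
  have h3 : (a+3).toNat = a.toNat + 3 := by omega
  simp only [h1, h2, h3]
  apply List.ext_getElem
  · simp; omega
  · intro i hi _
    simp only [List.length_take, List.length_drop] at hi
    have hi4 : i < 4 := by omega
    simp only [List.getElem_take, List.getElem_drop]
    interval_cases i <;> simp


set_option maxHeartbeats 1000000 in
lemma core (cs : List Char) (h : 32 ≤ cs.length) :
    (let chunks := (PySem.List.pyRange 0 32 4).map
        (fun i => PySem.List.slice cs (some i) (some (i + 4)))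
     (PySem.List.pyRange 0 8 1).foldl
      (fun acc i =>
        let left : List Char :=
          if i = 0 then ['0']
          else [PySem.List.pyGetD (PySem.List.pyGetD chunks (i - 1) []) 0 '0']
        let right : List Char :=
          if i = 7 then ['0']
          else [PySem.List.pyGetD (PySem.List.pyGetD chunks (i + 1) []) 1 '0']
        acc ++ left ++ PySem.List.pyGetD chunks i [] ++ right)
      []) =
    manglerTable.map (fun j => if j < 0 then '0' else PySem.List.pyGetD cs j '0') := by
  have hr32 : PySem.List.pyRange 0 32 4 = [0,4,8,12,16,20,24,28] := by decide
  have hr8 : PySem.List.pyRange 0 8 1 = [0,1,2,3,4,5,6,7] := by decide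
  simp only [hr32, hr8, List.map]
  rw [slice_four cs 0 (by omega) (by omega), slice_four cs 4 (by omega) (by omega),
      slice_four cs 8 (by omega) (by omega), slice_four cs 12 (by omega) (by omega),
      slice_four cs 16 (by omega) (by omega), slice_four cs 20 (by omega) (by omega),
      slice_four cs 24 (by omega) (by omega), slice_four cs 28 (by omega) (by omega)]
  simp only [List.foldl, manglerTable, List.map]
  norm_num [PySem.List.pyGetD_ofNat', PySem.List.pyGetD_zero_cons]

-- ===== VERDICT (by name: the statement is the Claim_ definition above) =====
theorem mangler_spec : Claim_equal_mangler := by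
  intro s _
  unfold Spec_mangler mangler mangler_alt
  exact congrArg String.ofList
    (core (PySem.Chars.zfill s.toList 32)
      (by rw [PySem.Chars.length_zfill]; omega))
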